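-- pv_equiv track=rewrite | github.com/westdart/ar_inv_hostname | filter_plugins/inventory_filters.py | ansible_inventory
-- ===== SOURCE A (Python) =====
-- def next_group_name(group):
--     return "-".join(group.split('-')[:-1])
--
-- def add_to_group(group, name, server):
--     _name = name.replace('-', '_')
--     if _name not in group:
--         group[_name] = [server]
--     else:
--         group[_name].append(server)
--     return group
--
-- def build_groups(servers):
--     '''
--     Args:
--         servers:  Array of server names
--     Returns: Array of groups based on '-' separated names
--     '''
--     groups = {}
--     for server in servers:
--         group1 = server.split('.')[0]
--         add_to_group(groups, group1, server)
--
--         group_name = group1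
--         while '-' in group_name:
--             group_name = next_group_name(group_name)
--             add_to_group(groups, group_name, server)
--
--     return groups
--
-- def ansible_inventory(servers):
--     '''
--     Args:
--         servers:  Array of server names
--     Returns: String representation of an 'ini' type ansible inventory
--     '''
--     groups = build_groups(servers)
--     result = ""
--     for group in groups:
--         result = result + "[" + group + "]\n"
--         for server in groups[group]:
--             result = result + server + " ansible_host=" + servers[server]['public_ip'] +"\n"
--         result = result + "\n"
--
--     return result
-- ===== SOURCE B (Python) =====
-- def group_names(server):
--     parts = server.split('.')[0].split('-')
--     return ['_'.join(parts[:i]) for i in range(len(parts), 0, -1)]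
--
-- def ansible_inventory(servers):
--     '''
--     Args:
--         servers:  Array of server names
--     Returns: String representation of an 'ini' type ansible inventory
--     '''
--     order = []
--     for server in servers:
--         for g in group_names(server):
--             if g not in order:
--                 order.append(g)
--     out = []
--     for g in order:
--         out.append('[' + g + ']\n')
--         for server in servers:
--             if g in group_names(server):
--                 out.append(server + ' ansible_host=' + servers[server]['public_ip'] + '\n')
--         out.append('\n')
--     return ''.join(out)
-- ===== Notes on version B (the rewrite author's own statement) =====
-- stated objective: alternative
-- what changed: B never builds a membership dict of server lists: it computes the first-seen ordered list of group names in one pass (testing each '_'-joined prefix against the order list) and then re-scans the whole server list once per group, emitting a line for every server whose prefix set contains the group, instead of A's dict that accumulates per-group server lists via a re-split/re-join while loop.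
-- outside the precondition, e.g. on ansible_inventory({'a': {}}): A raises KeyError, B raises KeyError
import Mathlib
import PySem

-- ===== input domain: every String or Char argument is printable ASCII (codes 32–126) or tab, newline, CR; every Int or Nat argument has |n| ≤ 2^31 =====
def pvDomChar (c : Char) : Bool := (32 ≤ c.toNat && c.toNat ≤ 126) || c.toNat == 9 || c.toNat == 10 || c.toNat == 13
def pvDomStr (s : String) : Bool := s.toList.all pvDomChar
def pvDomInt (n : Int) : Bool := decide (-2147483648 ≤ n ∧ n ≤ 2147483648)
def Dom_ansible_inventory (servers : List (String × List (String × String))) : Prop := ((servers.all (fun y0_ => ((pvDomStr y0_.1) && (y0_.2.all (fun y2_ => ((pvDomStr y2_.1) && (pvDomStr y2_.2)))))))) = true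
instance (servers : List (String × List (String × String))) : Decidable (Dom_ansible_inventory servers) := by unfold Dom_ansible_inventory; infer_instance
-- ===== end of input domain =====

-- B drops A's group dict entirely: it computes the first-seen ordered list of group names
-- in one pass and then re-scans the server list once per group, emitting a line for every
-- server whose prefix set contains that group (objective: alternative, not faster);
-- the equivalence is about the return value (neither version mutates its argument).

-- ===== PORT A =====
def next_group_name (group : String) : String :=
  PySem.Str.join "-" (PySem.List.slice ((PySem.Str.split? group "-").getD []) none (some (-1)))

def add_to_group (group : PySem.Dict String (List String)) (name server : String) :
    PySem.Dict String (List String) :=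
  let nm := PySem.Str.replace name "-" "_"
  if group.contains nm = false then group.insert nm [server]
  else group.modify nm [] (fun l => l ++ [server])

-- the 'while "-" in group_name' loop of build_groups; fuel = length of the starting
-- name is a totality guard only (each iteration strictly shortens the name)
def buildWhile (fuel : Nat) (groups : PySem.Dict String (List String))
    (group_name server : String) : PySem.Dict String (List String) :=
  match fuel with
  | 0 => groups
  | f + 1 =>
    if PySem.Str.isIn "-" group_name then
      let g := next_group_name group_name
      buildWhile f (add_to_group groups g server) g server
    else groups

def build_groups (servers : List (String × List (String × String))) :
    PySem.Dict String (List String) :=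
  servers.foldl (fun groups p =>
    let server := p.1
    let group1 := (PySem.List.pyGet? ((PySem.Str.split? server ".").getD []) 0).getD ""
    let groups := add_to_group groups group1 server
    buildWhile group1.toList.length groups group1 server) PySem.Dict.empty

def ansible_inventory (servers : List (String × List (String × String))) : String :=
  let groups := build_groups servers
  groups.keys.foldl (fun result group =>
    let result := result ++ "[" ++ group ++ "]" ++ "\n"
    let result := (groups.getD group []).foldl (fun result server =>
      result ++ server ++ " ansible_host=" ++
        PySem.Dict.getD (PySem.Dict.mk ((PySem.Dict.mk servers).getD server [])) "public_ip" ""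
        ++ "\n") result
    result ++ "\n") ""

-- ===== PORT B =====
def group_names (server : String) : List String :=
  let parts := (PySem.Str.split?
      ((PySem.List.pyGet? ((PySem.Str.split? server ".").getD []) 0).getD "") "-").getD []
  (PySem.List.pyRange (parts.length : Int) 0 (-1)).map
    (fun i => PySem.Str.join "_" (PySem.List.slice parts none (some i)))

def ansible_inventory_alt (servers : List (String × List (String × String))) : String :=
  let order := servers.foldl (fun order p =>
    (group_names p.1).foldl (fun order g =>
      if g ∈ order then order else order ++ [g]) order) ([] : List String)
  let out := order.foldl (fun out g =>
    let out := out ++ ["[" ++ g ++ "]\n"]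
    let out := servers.foldl (fun out p =>
      if g ∈ group_names p.1 then
        out ++ [p.1 ++ " ansible_host=" ++
          PySem.Dict.getD (PySem.Dict.mk ((PySem.Dict.mk servers).getD p.1 []))
            "public_ip" "" ++ "\n"]
      else out) out
    out ++ ["\n"]) ([] : List String)
  PySem.Str.join "" out

-- ===== PRECONDITION & SPEC =====
-- Pre_ excludes (a) inputs whose inner dict lacks a 'public_ip' key, on which A raises
-- KeyError (B raises there too), and (b) association lists with duplicate keys (outer or
-- inner), which do not represent a Python dict, so behaviour there is an artefact of the
-- list encoding of dicts.
def Pre_ansible_inventory (servers : List (String × List (String × String))) : Prop :=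
  (servers.map Prod.fst).Nodup ∧
    ∀ p ∈ servers, (p.2.map Prod.fst).Nodup ∧ "public_ip" ∈ p.2.map Prod.fst
instance (servers : List (String × List (String × String))) :
    Decidable (Pre_ansible_inventory servers) := by unfold Pre_ansible_inventory; infer_instance

def pvWitness_ansible_inventory : (List (String × List (String × String))) :=
  [("web-a-1.example.com", [("public_ip", "10.0.0.1")]),
   ("web-a-2.example.com", [("public_ip", "10.0.0.2")]),
   ("db.example.com", [("public_ip", "10.0.0.3")])]

def Spec_ansible_inventory (servers : List (String × List (String × String))) (out : String) :
    Prop := out = ansible_inventory_alt servers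
instance (servers : List (String × List (String × String))) (out : String) :
    Decidable (Spec_ansible_inventory servers out) := by unfold Spec_ansible_inventory; infer_instance

-- ===== CLAIM (what is proved, stated in full; the proofs are below) =====
def Claim_equal_ansible_inventory : Prop := ∀ (servers : List (String × List (String × String))), Dom_ansible_inventory servers → Pre_ansible_inventory servers → Spec_ansible_inventory servers (ansible_inventory servers)

-- ===== LEMMAS AND PROOFS =====

def subChar (c : Char) : Char := if c = '-' then '_' else c

def splitD : List Char → List (List Char)
  | [] => [[]]
  | c :: r =>
    if c = '-' then [] :: splitD r
    else
      match splitD r with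
      | [] => [[c]]
      | p :: ps => (c :: p) :: ps

def mapHead (f : List Char → List Char) : List (List Char) → List (List Char)
  | [] => []
  | p :: ps => f p :: ps

lemma mapHead_id (l : List (List Char)) : mapHead (fun p => p) l = l := by
  cases l <;> simp [mapHead]

lemma splitD_ne_nil (l : List Char) : splitD l ≠ [] := by
  cases l with
  | nil => simp [splitD]
  | cons c r =>
    simp only [splitD]
    split
    · simp
    · split <;> simp

lemma splitD_no_dash (l : List Char) : ∀ p ∈ splitD l, '-' ∉ p := by
  induction l with
  | nil => simp [splitD]
  | cons c r ih =>
    intro p hp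
    by_cases hc : c = '-'
    · simp only [splitD, if_pos hc] at hp
      rw [List.mem_cons] at hp
      rcases hp with h | h
      · simp [h]
      · exact ih p h
    · simp only [splitD, if_neg hc] at hp
      rcases hq : splitD r with _ | ⟨q, qs⟩
      · exact absurd hq (splitD_ne_nil r)
      · rw [hq] at hp
        rw [List.mem_cons] at hp
        rcases hp with h | h
        · subst h
          intro hmem
          rw [List.mem_cons] at hmem
          rcases hmem with h | h
          · exact hc h.symm
          · exact ih q (by simp [hq]) h
        · exact ih p (by rw [hq, List.mem_cons]; right; exact h)

lemma splitOn_go_char (l : List Char) : ∀ (fuel : Nat) (cur : List Char)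
    (acc : List (List Char)), l.length ≤ fuel →
    PySem.Chars.splitOn.go ['-'] fuel l cur acc
      = acc.reverse ++ mapHead (fun p => cur.reverse ++ p) (splitD l) := by
  induction l with
  | nil =>
    intro fuel cur acc _
    cases fuel <;> simp [PySem.Chars.splitOn.go, splitD, mapHead]
  | cons c r ih =>
    intro fuel cur acc hf
    cases fuel with
    | zero => simp at hf
    | succ f =>
      simp only [List.length_cons] at hf
      rw [PySem.Chars.splitOn.go]
      by_cases hc : c = '-'
      · subst hc
        rw [if_pos (by simp [List.isPrefixOf])]
        rw [show List.drop (List.length ['-']) ('-' :: r) = r by simp]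
        rw [ih f [] (cur.reverse :: acc) (by omega)]
        simp only [splitD, reduceIte, mapHead, List.reverse_cons, List.append_assoc]
        cases hq : splitD r <;> simp
      · rw [if_neg (by simp [List.isPrefixOf]; exact Ne.symm hc)]
        rw [ih f (c :: cur) acc (by omega)]
        rcases hq : splitD r with _ | ⟨q, qs⟩
        · exact absurd hq (splitD_ne_nil r)
        · simp [splitD, hc, hq, mapHead]

lemma splitOn_eq_splitD (l : List Char) : PySem.Chars.splitOn l ['-'] = splitD l := by
  rw [PySem.Chars.splitOn, splitOn_go_char l (l.length + 1) [] [] (by omega)]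
  simp [mapHead_id]

lemma join_splitD (l : List Char) : PySem.Chars.join ['-'] (splitD l) = l := by
  induction l with
  | nil => simp [splitD, PySem.Chars.join, List.intercalate]
  | cons c r ih =>
    rcases hq : splitD r with _ | ⟨q, qs⟩
    · exact absurd hq (splitD_ne_nil r)
    · rw [hq] at ih
      by_cases hc : c = '-'
      · simp only [splitD, if_pos hc, hq, PySem.Chars.join_cons_cons]
        simp [ih, hc]
      · simp only [splitD, if_neg hc, hq]
        cases qs with
        | nil =>
          simp only [PySem.Chars.join_singleton] at ih ⊢
          simp [ih]
        | cons w ws =>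
          simp only [PySem.Chars.join_cons_cons] at ih ⊢
          simp [← ih]

lemma splitD_dashfree (p : List Char) (hp : '-' ∉ p) : splitD p = [p] := by
  induction p with
  | nil => simp [splitD]
  | cons c t ih =>
    have hc : ¬ c = '-' := fun h => hp (by simp [h])
    have ht := ih (fun h => hp (List.mem_cons_of_mem c h))
    simp [splitD, hc, ht]

lemma splitD_append_dash (p r : List Char) (hp : '-' ∉ p) :
    splitD (p ++ '-' :: r) = p :: splitD r := by
  induction p with
  | nil => simp [splitD]
  | cons c t ih =>
    have hc : ¬ c = '-' := fun h => hp (by simp [h])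
    have ht := ih (fun h => hp (List.mem_cons_of_mem c h))
    simp [splitD, hc, ht]

lemma splitD_join (ts : List (List Char)) (hne : ts ≠ []) (hdf : ∀ t ∈ ts, '-' ∉ t) :
    splitD (PySem.Chars.join ['-'] ts) = ts := by
  induction ts with
  | nil => exact absurd rfl hne
  | cons t rest ih =>
    cases rest with
    | nil =>
      rw [PySem.Chars.join_singleton]
      exact splitD_dashfree t (hdf t (by simp))
    | cons t' rest' =>
      rw [PySem.Chars.join_cons_cons, List.append_assoc, List.singleton_append,
        splitD_append_dash t _ (hdf t (by simp))]
      rw [ih (by simp) (fun x hx => hdf x (List.mem_cons_of_mem t hx))]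

lemma replace_go_char (l : List Char) : ∀ (fuel : Nat) (acc : List Char), l.length ≤ fuel →
    PySem.Chars.replace.go ['-'] ['_'] fuel l acc = acc.reverse ++ l.map subChar := by
  induction l with
  | nil =>
    intro fuel acc _
    cases fuel <;> simp [PySem.Chars.replace.go]
  | cons c t ih =>
    intro fuel acc hf
    cases fuel with
    | zero => simp at hf
    | succ f =>
      simp only [List.length_cons] at hf
      rw [PySem.Chars.replace.go]
      by_cases hc : c = '-'
      · subst hc
        rw [if_pos (by simp [List.isPrefixOf])]
        rw [show List.drop (List.length ['-']) ('-' :: t) = t by simp]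
        rw [ih f _ (by omega)]
        simp [subChar]
      · rw [if_neg (by simp [List.isPrefixOf]; exact Ne.symm hc)]
        rw [ih f _ (by omega)]
        simp [subChar, hc]

lemma replace_char (l : List Char) :
    PySem.Chars.replace l ['-'] ['_'] = l.map subChar := by
  rw [PySem.Chars.replace, if_neg (by simp)]
  rw [replace_go_char l l.length [] (le_refl _)]
  simp

lemma map_subChar_dashfree (t : List Char) (ht : '-' ∉ t) : t.map subChar = t := by
  have : ∀ c ∈ t, subChar c = c := by
    intro c hc
    have hne : ¬ c = '-' := fun h => ht (h ▸ hc)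
    simp [subChar, hne]
  calc t.map subChar = t.map id := List.map_congr_left this
    _ = t := List.map_id t

lemma map_subChar_join (ts : List (List Char)) (hdf : ∀ t ∈ ts, '-' ∉ t) :
    (PySem.Chars.join ['-'] ts).map subChar = PySem.Chars.join ['_'] ts := by
  induction ts with
  | nil => simp [PySem.Chars.join_nil]
  | cons t rest ih =>
    cases rest with
    | nil =>
      rw [PySem.Chars.join_singleton, PySem.Chars.join_singleton]
      exact map_subChar_dashfree t (hdf t (by simp))
    | cons t' rest' =>
      rw [PySem.Chars.join_cons_cons, PySem.Chars.join_cons_cons]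
      rw [List.map_append, List.map_append]
      rw [map_subChar_dashfree t (hdf t (by simp))]
      rw [ih (fun x hx => hdf x (List.mem_cons_of_mem t hx))]
      simp [subChar]

lemma mem_join_dash (ts : List (List Char)) (hdf : ∀ t ∈ ts, '-' ∉ t) :
    '-' ∈ PySem.Chars.join ['-'] ts ↔ 2 ≤ ts.length := by
  cases ts with
  | nil => simp [PySem.Chars.join_nil]
  | cons t rest =>
    cases rest with
    | nil =>
      rw [PySem.Chars.join_singleton]
      simp [hdf t (by simp)]
    | cons t' rest' =>
      rw [PySem.Chars.join_cons_cons]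
      simp

lemma singleton_infix_iff (c : Char) (l : List Char) : [c] <:+: l ↔ c ∈ l := by
  constructor
  · intro h
    exact List.singleton_sublist.mp h.sublist
  · intro h
    obtain ⟨s, t, rfl⟩ := List.append_of_mem h
    exact ⟨s, t, by simp⟩

lemma isIn_dash (l : List Char) :
    PySem.Chars.isIn ['-'] l = decide ('-' ∈ l) := by
  by_cases h : '-' ∈ l
  · simp only [h, decide_true]
    exact (PySem.Chars.isIn_iff_infix _ _).mpr ((singleton_infix_iff _ _).mpr h)
  · simp only [h, decide_false]
    rw [PySem.Chars.isIn_eq_false_iff]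
    exact fun hin => h ((singleton_infix_iff _ _).mp hin)

def keysUpTo (ps : List (List Char)) : Nat → List (List Char)
  | 0 => []
  | j + 1 => PySem.Chars.join ['_'] (ps.take (j + 1)) :: keysUpTo ps j

def keyFold (ks : List (List Char)) (server : String) (d : PySem.Dict String (List String)) :
    PySem.Dict String (List String) :=
  ks.foldl (fun d k => d.modify (String.ofList k) [] (fun l => l ++ [server])) d

lemma add_to_group_eq_modify (d : PySem.Dict String (List String)) (name server : String) :
    add_to_group d name server
      = d.modify (PySem.Str.replace name "-" "_") [] (fun l => l ++ [server]) := by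
  unfold add_to_group PySem.Dict.modify
  by_cases h : d.contains (PySem.Str.replace name "-" "_") = true
  · simp [h]
  · simp only [Bool.not_eq_true] at h
    rw [PySem.Dict.getD_of_not_contains d _ h]
    simp [h]

lemma split?_join (ts : List (List Char)) (hne : ts ≠ []) (hdf : ∀ t ∈ ts, '-' ∉ t) :
    PySem.Str.split? (String.ofList (PySem.Chars.join ['-'] ts)) "-"
      = some (ts.map String.ofList) := by
  rw [PySem.Str.split?]
  rw [show (String.ofList (PySem.Chars.join ['-'] ts)).toList = PySem.Chars.join ['-'] ts from
    String.toList_ofList]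
  rw [show ("-" : String).toList = ['-'] from rfl]
  rw [PySem.Chars.split?, if_neg (by simp)]
  rw [splitOn_eq_splitD, splitD_join ts hne hdf]
  rfl

lemma replace_join_key (ts : List (List Char)) (hdf : ∀ t ∈ ts, '-' ∉ t) :
    PySem.Str.replace (String.ofList (PySem.Chars.join ['-'] ts)) "-" "_"
      = String.ofList (PySem.Chars.join ['_'] ts) := by
  rw [PySem.Str.replace]
  rw [show (String.ofList (PySem.Chars.join ['-'] ts)).toList = PySem.Chars.join ['-'] ts from
    String.toList_ofList]
  rw [show ("-" : String).toList = ['-'] from rfl, show ("_" : String).toList = ['_'] from rfl]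
  rw [replace_char, map_subChar_join ts hdf]

lemma map_toList_map_ofList (ts : List (List Char)) :
    List.map String.toList (ts.map String.ofList) = ts := by
  rw [List.map_map]
  simp [Function.comp_def, String.toList_ofList]

lemma take_ne_nil (ps : List (List Char)) (i : Nat) (h1 : 1 ≤ i) (h2 : i ≤ ps.length) :
    ps.take i ≠ [] := by
  intro h
  have h3 := congrArg List.length h
  rw [List.length_take] at h3
  simp only [List.length_nil] at h3
  rcases Nat.min_eq_zero_iff.mp h3 with h4 | h4 <;> omega

lemma next_group_name_join (ps : List (List Char)) (hdf : ∀ t ∈ ps, '-' ∉ t)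
    (i : Nat) (h1 : 1 ≤ i) (h2 : i ≤ ps.length) :
    next_group_name (String.ofList (PySem.Chars.join ['-'] (ps.take i)))
      = String.ofList (PySem.Chars.join ['-'] (ps.take (i - 1))) := by
  rw [next_group_name]
  rw [split?_join (ps.take i) (take_ne_nil ps i h1 h2)
    (fun t ht => hdf t (List.mem_of_mem_take ht))]
  rw [Option.getD_some, PySem.List.slice_to_neg_one, ← List.map_dropLast]
  rw [List.dropLast_eq_take, List.length_take, List.take_take]
  rw [show min i ps.length - 1 = i - 1 from by omega]
  rw [show min (i - 1) i = i - 1 from by omega]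
  rw [PySem.Str.join, map_toList_map_ofList]
  rfl

lemma isIn_join (ts : List (List Char)) :
    PySem.Str.isIn "-" (String.ofList (PySem.Chars.join ['-'] ts))
      = decide ('-' ∈ PySem.Chars.join ['-'] ts) := by
  rw [PySem.Str.isIn]
  rw [show (String.ofList (PySem.Chars.join ['-'] ts)).toList = PySem.Chars.join ['-'] ts from
    String.toList_ofList]
  exact isIn_dash _

lemma buildWhile_unroll (ps : List (List Char)) (hdf : ∀ t ∈ ps, '-' ∉ t) (s : String) :
    ∀ (i : Nat), 1 ≤ i → i ≤ ps.length → ∀ (fuel : Nat) (d : PySem.Dict String (List String)),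
      i - 1 ≤ fuel →
      buildWhile fuel d (String.ofList (PySem.Chars.join ['-'] (ps.take i))) s
        = keyFold (keysUpTo ps (i - 1)) s d := by
  intro i
  induction i with
  | zero => omega
  | succ j ih =>
    intro h1 h2 fuel d hf
    have hdf' : ∀ t ∈ ps.take (j + 1), '-' ∉ t := fun t ht => hdf t (List.mem_of_mem_take ht)
    cases Nat.eq_zero_or_pos j with
    | inl hj =>
      subst hj
      have hnd : decide ('-' ∈ PySem.Chars.join ['-'] (ps.take 1)) = false := by
        apply decide_eq_false
        intro hm
        have := (mem_join_dash _ hdf').mp hm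
        rw [List.length_take] at this
        omega
      cases fuel with
      | zero => simp [buildWhile, keysUpTo, keyFold]
      | succ f =>
        rw [buildWhile, isIn_join, hnd]
        simp [keysUpTo, keyFold]
    | inr hj =>
      obtain ⟨f, rfl⟩ : ∃ f, fuel = f + 1 := ⟨fuel - 1, by omega⟩
      have hnd : decide ('-' ∈ PySem.Chars.join ['-'] (ps.take (j + 1))) = true := by
        apply decide_eq_true
        apply (mem_join_dash _ hdf').mpr
        rw [List.length_take]
        omega
      rw [buildWhile, isIn_join, hnd]
      rw [if_pos rfl]
      rw [next_group_name_join ps hdf (j + 1) h1 h2]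
      simp only [Nat.add_sub_cancel]
      rw [add_to_group_eq_modify]
      rw [replace_join_key (ps.take j) (fun t ht => hdf t (List.mem_of_mem_take ht))]
      rw [ih (by omega) (by omega) f _ (by omega)]
      show keyFold (keysUpTo ps (j - 1)) s _ = keyFold (keysUpTo ps j) s d
      obtain ⟨j', rfl⟩ : ∃ j', j = j' + 1 := ⟨j - 1, by omega⟩
      simp only [Nat.add_sub_cancel, keysUpTo, keyFold, List.foldl_cons]

lemma buildWhile_full (ps : List (List Char)) (hdf : ∀ t ∈ ps, '-' ∉ t) (s : String)
    (fuel : Nat) (d : PySem.Dict String (List String)) (hn : 1 ≤ ps.length)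
    (hf : ps.length - 1 ≤ fuel) :
    buildWhile fuel d (String.ofList (PySem.Chars.join ['-'] ps)) s
      = keyFold (keysUpTo ps (ps.length - 1)) s d := by
  have h := buildWhile_unroll ps hdf s ps.length hn le_rfl fuel d hf
  rwa [List.take_length] at h

lemma join_dash_length (ts : List (List Char)) :
    ts.length - 1 ≤ (PySem.Chars.join ['-'] ts).length := by
  induction ts with
  | nil => simp
  | cons t rest ih =>
    cases rest with
    | nil => simp
    | cons t' rest' =>
      rw [PySem.Chars.join_cons_cons]
      simp only [List.length_append, List.length_cons] at ih ⊢
      omega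

lemma splitD_len_pos (l : List Char) : 1 ≤ (splitD l).length := by
  rcases hq : splitD l with _ | ⟨q, qs⟩
  · exact absurd hq (splitD_ne_nil l)
  · simp

lemma stepA_eq (d : PySem.Dict String (List String)) (g1 s : String) :
    buildWhile g1.toList.length (add_to_group d g1 s) g1 s
      = keyFold (keysUpTo (splitD g1.toList) (splitD g1.toList).length) s d := by
  have hdf := splitD_no_dash g1.toList
  have hn := splitD_len_pos g1.toList
  have hg : g1 = String.ofList (PySem.Chars.join ['-'] (splitD g1.toList)) := by
    rw [join_splitD, String.ofList_toList]
  conv_lhs => rw [hg]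
  rw [add_to_group_eq_modify, replace_join_key _ hdf]
  rw [String.toList_ofList]
  rw [buildWhile_full _ hdf s _ _ hn (join_dash_length _)]
  obtain ⟨m, hm⟩ : ∃ m, (splitD g1.toList).length = m + 1 := ⟨(splitD g1.toList).length - 1, by omega⟩
  rw [hm]
  simp only [Nat.add_sub_cancel, keysUpTo, keyFold, List.foldl_cons]
  rw [show (splitD g1.toList).take (m + 1) = splitD g1.toList from by
    rw [← hm, List.take_length]]

lemma pyRange_countdown_cons (a : Nat) (ha : 1 ≤ a) :
    PySem.List.pyRange (a : Int) 0 (-1)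
      = (a : Int) :: PySem.List.pyRange ((a : Int) - 1) 0 (-1) := by
  obtain ⟨b, rfl⟩ : ∃ b, a = b + 1 := ⟨a - 1, by omega⟩
  rw [PySem.List.pyRange_neg_one, PySem.List.pyRange_neg_one]
  rw [show ((b + 1 : Nat) : Int) - 1 - 0 = (b : Int) from by push_cast; ring]
  rw [show ((b + 1 : Nat) : Int) - 0 = ((b + 1 : Nat) : Int) from by ring]
  rw [show (((b + 1 : Nat) : Int)).toNat = b + 1 from by omega]
  rw [show ((b : Int)).toNat = b from by omega]
  rw [List.range_succ_eq_map]
  rw [List.map_cons, List.map_map]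
  congr 1
  apply List.map_congr_left
  intro k _
  simp only [Function.comp_apply]
  push_cast
  ring

lemma split?_dash (g : String) :
    PySem.Str.split? g "-" = some ((splitD g.toList).map String.ofList) := by
  rw [PySem.Str.split?]
  rw [show ("-" : String).toList = ['-'] from rfl]
  rw [PySem.Chars.split?, if_neg (by simp)]
  rw [splitOn_eq_splitD]
  rfl

lemma strjoin_underscore (ts : List (List Char)) :
    PySem.Str.join "_" (ts.map String.ofList)
      = String.ofList (PySem.Chars.join ['_'] ts) := by
  rw [PySem.Str.join, map_toList_map_ofList]
  rfl

def g1Of (p : String) : String :=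
  (PySem.List.pyGet? ((PySem.Str.split? p ".").getD []) 0).getD ""

def psOf (s : String) : List (List Char) := splitD (g1Of s).toList

def ksCh (s : String) : List (List Char) := keysUpTo (psOf s) (psOf s).length

def ksOf (s : String) : List String := (ksCh s).map String.ofList

def pairsOf (servers : List (String × List (String × String))) : List (String × String) :=
  servers.flatMap (fun p => (ksOf p.1).map (fun k => (k, p.1)))

def dictOf (servers : List (String × List (String × String))) :
    PySem.Dict String (List String) :=
  (pairsOf servers).foldl (fun d q => d.modify q.1 [] (fun l => l ++ [q.2])) PySem.Dict.empty

lemma build_groups_eq (servers : List (String × List (String × String))) :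
    build_groups servers = dictOf servers := by
  rw [build_groups, dictOf, pairsOf, List.foldl_flatMap]
  apply PySem.List.foldl_congr_mem
  intro acc p _
  have h1 : buildWhile (g1Of p.1).toList.length (add_to_group acc (g1Of p.1) p.1) (g1Of p.1) p.1
      = keyFold (ksCh p.1) p.1 acc := stepA_eq acc (g1Of p.1) p.1
  have h2 : keyFold (ksCh p.1) p.1 acc
      = ((ksOf p.1).map (fun k => (k, p.1))).foldl
          (fun d q => d.modify q.1 [] (fun l => l ++ [q.2])) acc := by
    rw [ksOf, List.map_map, List.foldl_map]
    rfl
  exact h1.trans h2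

-- ----- B's group_names equals the canonical key list -----

lemma mapRange_keys (ps : List (List Char)) :
    ∀ (j : Nat), j ≤ ps.length →
    (PySem.List.pyRange (j : Int) 0 (-1)).map
        (fun i => PySem.Str.join "_" (PySem.List.slice (ps.map String.ofList) none (some i)))
      = (keysUpTo ps j).map String.ofList := by
  intro j
  induction j with
  | zero =>
    intro _
    rw [show ((0 : Nat) : Int) = 0 from rfl, PySem.List.pyRange_neg_one]
    simp [keysUpTo]
  | succ j ih =>
    intro hj
    rw [pyRange_countdown_cons (j + 1) (by omega), List.map_cons]
    rw [show ((j + 1 : Nat) : Int) - 1 = ((j : Nat) : Int) from by push_cast; ring]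
    rw [ih (by omega)]
    rw [PySem.List.slice_to _ (by positivity)]
    rw [show (((j + 1 : Nat) : Int)).toNat = j + 1 from by omega]
    rw [← List.map_take, strjoin_underscore]
    simp only [keysUpTo, List.map_cons]

lemma group_names_eq (s : String) : group_names s = ksOf s := by
  rw [group_names]
  show (PySem.List.pyRange ((((PySem.Str.split? (g1Of s) "-").getD []).length : Int)) 0
      (-1)).map (fun i => PySem.Str.join "_"
        (PySem.List.slice ((PySem.Str.split? (g1Of s) "-").getD []) none (some i)))
    = ksOf s
  rw [show (PySem.Str.split? (g1Of s) "-").getD [] = (psOf s).map String.ofList from by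
    rw [split?_dash]; rfl]
  rw [List.length_map]
  exact mapRange_keys (psOf s) (psOf s).length le_rfl

-- ----- the canonical key list has no duplicates -----

lemma join_append_singleton (sep : List Char) (xs : List (List Char)) (x : List Char)
    (hne : xs ≠ []) :
    PySem.Chars.join sep (xs ++ [x]) = PySem.Chars.join sep xs ++ sep ++ x := by
  induction xs with
  | nil => exact absurd rfl hne
  | cons t rest ih =>
    cases rest with
    | nil => simp [PySem.Chars.join_singleton, PySem.Chars.join_cons_cons]
    | cons t' rest' =>
      have ih' := ih (by simp)
      rw [List.cons_append] at ih'
      rw [List.cons_append, List.cons_append, PySem.Chars.join_cons_cons, ih']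
      rw [PySem.Chars.join_cons_cons]
      simp [List.append_assoc]

lemma len_join_take_step (ps : List (List Char)) (m : Nat) (h1 : 1 ≤ m)
    (h2 : m < ps.length) :
    (PySem.Chars.join ['_'] (ps.take m)).length
      < (PySem.Chars.join ['_'] (ps.take (m + 1))).length := by
  rw [List.take_succ_eq_append_getElem h2]
  rw [join_append_singleton _ _ _ (take_ne_nil ps m h1 (by omega))]
  simp

lemma len_join_take_lt (ps : List (List Char)) (i j : Nat) (h1 : 1 ≤ i) (hij : i < j)
    (hj : j ≤ ps.length) :
    (PySem.Chars.join ['_'] (ps.take i)).length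
      < (PySem.Chars.join ['_'] (ps.take j)).length := by
  induction j with
  | zero => omega
  | succ j ih =>
    rcases Nat.lt_or_ge i j with h | h
    · exact lt_trans (ih h (by omega)) (len_join_take_step ps j (by omega) (by omega))
    · have : i = j := by omega
      subst this
      exact len_join_take_step ps i h1 (by omega)

lemma mem_keysUpTo (ps : List (List Char)) (j : Nat) (k : List Char) :
    k ∈ keysUpTo ps j ↔ ∃ i, 1 ≤ i ∧ i ≤ j ∧ k = PySem.Chars.join ['_'] (ps.take i) := by
  induction j with
  | zero =>
    simp only [keysUpTo, List.not_mem_nil, false_iff]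
    rintro ⟨i, h1, h2, _⟩; omega
  | succ j ih =>
    simp only [keysUpTo, List.mem_cons, ih]
    constructor
    · rintro (h | ⟨i, h1, h2, h3⟩)
      · exact ⟨j + 1, by omega, le_rfl, h⟩
      · exact ⟨i, h1, by omega, h3⟩
    · rintro ⟨i, h1, h2, h3⟩
      rcases Nat.eq_or_lt_of_le h2 with h | h
      · left; rw [h3, h]
      · right; exact ⟨i, h1, by omega, h3⟩

lemma nodup_keysUpTo (ps : List (List Char)) :
    ∀ (j : Nat), j ≤ ps.length → (keysUpTo ps j).Nodup := by
  intro j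
  induction j with
  | zero => intro _; simp [keysUpTo]
  | succ j ih =>
    intro hj
    rw [keysUpTo, List.nodup_cons]
    refine ⟨?_, ih (by omega)⟩
    intro hmem
    obtain ⟨i, h1, h2, h3⟩ := (mem_keysUpTo ps j _).mp hmem
    have := len_join_take_lt ps i (j + 1) h1 (by omega) hj
    rw [← h3] at this
    omega

lemma ofList_injective : Function.Injective String.ofList := by
  intro a b h
  have := congrArg String.toList h
  rwa [String.toList_ofList, String.toList_ofList] at this

lemma nodup_ksOf (s : String) : (ksOf s).Nodup := by
  rw [ksOf]
  exact (nodup_keysUpTo (psOf s) (psOf s).length le_rfl).map ofList_injective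

-- ----- values of the dict: per-group member lists by filtering the server list -----

def membersOf (servers : List (String × List (String × String))) (g : String) : List String :=
  (servers.filter (fun p => decide (g ∈ ksOf p.1))).map (·.1)

lemma flatMap_ite_filter {α β : Type} (l : List α) (q : α → Prop) [DecidablePred q]
    (f : α → β) :
    l.flatMap (fun x => if q x then [f x] else [])
      = (l.filter (fun x => decide (q x))).map f := by
  induction l with
  | nil => simp
  | cons x rest ih =>
    by_cases h : q x <;> simp [h, ih]

lemma filter_pairs_single (s g : String) :
    (((ksOf s).map (fun k => (k, s))).filter (fun q => q.1 == g)).map (·.2)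
      = if g ∈ ksOf s then [s] else [] := by
  rw [List.filter_map]
  rw [show ((fun q : String × String => q.1 == g) ∘ (fun k => (k, s))) = (· == g) from rfl]
  rw [List.filter_beq]
  by_cases h : g ∈ ksOf s
  · rw [List.count_eq_one_of_mem (nodup_ksOf s) h, if_pos h]
    simp
  · rw [List.count_eq_zero_of_not_mem h, if_neg h]
    simp

lemma getD_dictOf (servers : List (String × List (String × String))) (g : String) :
    (dictOf servers).getD g [] = membersOf servers g := by
  rw [dictOf, PySem.Dict.getD_foldl_modify_append, PySem.Dict.getD_empty, List.nil_append]
  rw [pairsOf, List.filter_flatMap, List.map_flatMap]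
  rw [membersOf, ← flatMap_ite_filter servers (fun p => g ∈ ksOf p.1) (·.1)]
  apply List.flatMap_congr  -- pointwise equality of the per-server contributions
  intro p _
  exact filter_pairs_single p.1 g

-- ----- keys of the dict: the first-seen order list B computes -----

lemma keys_dictOf (servers : List (String × List (String × String))) :
    (dictOf servers).keys
      = PySem.Set.ofList (servers.flatMap (fun p => ksOf p.1)) := by
  rw [dictOf, PySem.Dict.keys_foldl_modify_key, PySem.Dict.keys_empty,
    PySem.Set.update_nil_left]
  congr 1
  rw [pairsOf, List.map_flatMap]
  apply List.flatMap_congr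
  intro p _
  simp [List.map_map, Function.comp_def]

def ordOf (servers : List (String × List (String × String))) : List String :=
  servers.foldl (fun order p =>
    (group_names p.1).foldl (fun order g =>
      if g ∈ order then order else order ++ [g]) order) []

lemma inner_order_update (ks : List String) (ord : PySem.Set String) :
    ks.foldl (fun order g => if g ∈ order then order else order ++ [g]) ord
      = PySem.Set.update ord ks := by
  induction ks generalizing ord with
  | nil => simp [PySem.Set.update_nil]
  | cons k rest ih =>
    rw [List.foldl_cons, PySem.Set.update_cons, ← ih]
    rw [PySem.Set.add_eq_ite]

lemma ordOf_eq (servers : List (String × List (String × String))) :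
    ordOf servers = (dictOf servers).keys := by
  rw [keys_dictOf, ordOf]
  have haux : ∀ (l : List (String × List (String × String))) (s : PySem.Set String),
      l.foldl (fun order p =>
        (group_names p.1).foldl (fun order g =>
          if g ∈ order then order else order ++ [g]) order) s
        = PySem.Set.update s (l.flatMap (fun p => ksOf p.1)) := by
    intro l
    induction l with
    | nil => intro s; simp [PySem.Set.update_nil]
    | cons p rest ih =>
      intro s
      rw [List.foldl_cons, ih, List.flatMap_cons, PySem.Set.update_append]
      rw [inner_order_update, group_names_eq]
  rw [haux servers [], PySem.Set.update_nil_left]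

-- ----- rendering -----

def lineStr (servers : List (String × List (String × String))) (s : String) : String :=
  s ++ " ansible_host=" ++
    PySem.Dict.getD (PySem.Dict.mk ((PySem.Dict.mk servers).getD s [])) "public_ip" "" ++ "\n"

def blockOf (servers : List (String × List (String × String))) (mem : String → List String)
    (g : String) : List Char :=
  ['['] ++ g.toList ++ [']', '\n']
    ++ ((mem g).map (fun s => (lineStr servers s).toList)).flatten ++ ['\n']

lemma renderA_inner_toList (servers : List (String × List (String × String)))
    (ms : List String) (r0 : String) :
    (ms.foldl (fun result server =>
      result ++ server ++ " ansible_host=" ++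
        PySem.Dict.getD (PySem.Dict.mk ((PySem.Dict.mk servers).getD server [])) "public_ip" ""
        ++ "\n") r0).toList
      = r0.toList ++ (ms.map (fun s => (lineStr servers s).toList)).flatten := by
  induction ms generalizing r0 with
  | nil => simp
  | cons m rest ih =>
    rw [List.foldl_cons, ih, List.map_cons, List.flatten_cons]
    simp [String.toList_append, lineStr, show ("\n" : String).toList = ['\n'] from rfl]

lemma renderA_fold_toList (servers : List (String × List (String × String)))
    (G : PySem.Dict String (List String)) (ks : List String) (r0 : String) :
    (ks.foldl (fun result group =>
      ((G.getD group []).foldl (fun result server =>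
        result ++ server ++ " ansible_host=" ++
          PySem.Dict.getD (PySem.Dict.mk ((PySem.Dict.mk servers).getD server []))
            "public_ip" "" ++ "\n") (result ++ "[" ++ group ++ "]" ++ "\n")) ++ "\n")
      r0).toList
      = r0.toList ++ (ks.map (blockOf servers (fun g => G.getD g []))).flatten := by
  induction ks generalizing r0 with
  | nil => simp
  | cons k rest ih =>
    rw [List.foldl_cons, ih, List.map_cons, List.flatten_cons]
    rw [String.toList_append, renderA_inner_toList]
    simp [String.toList_append, blockOf,
      show ("\n" : String).toList = ['\n'] from rfl,
      show ("[" : String).toList = ['['] from rfl,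
      show ("]" : String).toList = [']'] from rfl]

def chunkOf (servers : List (String × List (String × String))) (g : String) : List String :=
  ["[" ++ g ++ "]\n"] ++ (membersOf servers g).map (lineStr servers) ++ ["\n"]

lemma innerB_fold (servers : List (String × List (String × String))) (g : String)
    (acc : List String) :
    servers.foldl (fun out p =>
      if g ∈ group_names p.1 then
        out ++ [p.1 ++ " ansible_host=" ++
          PySem.Dict.getD (PySem.Dict.mk ((PySem.Dict.mk servers).getD p.1 []))
            "public_ip" "" ++ "\n"]
      else out) acc
      = acc ++ (membersOf servers g).map (lineStr servers) := by
  rw [membersOf]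
  have haux : ∀ (l : List (String × List (String × String))) (acc : List String),
      l.foldl (fun out p =>
        if g ∈ group_names p.1 then
          out ++ [p.1 ++ " ansible_host=" ++
            PySem.Dict.getD (PySem.Dict.mk ((PySem.Dict.mk servers).getD p.1 []))
              "public_ip" "" ++ "\n"]
        else out) acc
      = acc ++ ((l.filter (fun p => decide (g ∈ ksOf p.1))).map (·.1)).map (lineStr servers) := by
    intro l
    induction l with
    | nil => simp
    | cons p rest ih =>
      intro acc
      rw [List.foldl_cons]
      by_cases h : g ∈ ksOf p.1
      · rw [if_pos (by rw [group_names_eq]; exact h)]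
        rw [ih]
        simp [h, lineStr]
      · rw [if_neg (by rw [group_names_eq]; exact h)]
        rw [ih]
        simp [h]
  exact haux servers acc

lemma outB_eq (servers : List (String × List (String × String))) (ord : List String)
    (acc : List String) :
    ord.foldl (fun out g =>
      (servers.foldl (fun out p =>
        if g ∈ group_names p.1 then
          out ++ [p.1 ++ " ansible_host=" ++
            PySem.Dict.getD (PySem.Dict.mk ((PySem.Dict.mk servers).getD p.1 []))
              "public_ip" "" ++ "\n"]
        else out) (out ++ ["[" ++ g ++ "]\n"])) ++ ["\n"]) acc
      = acc ++ ord.flatMap (chunkOf servers) := by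
  induction ord generalizing acc with
  | nil => simp
  | cons g rest ih =>
    rw [List.foldl_cons, ih, List.flatMap_cons]
    rw [innerB_fold]
    simp [chunkOf]

lemma join_nil_flatten (M : List (List Char)) :
    PySem.Chars.join [] M = M.flatten := by
  induction M with
  | nil => simp [PySem.Chars.join_nil]
  | cons m rest ih =>
    cases rest with
    | nil => simp [PySem.Chars.join_singleton]
    | cons m' rest' =>
      rw [PySem.Chars.join_cons_cons, List.flatten_cons, ih]
      simp

lemma flatten_flatMap {α β : Type} (l : List α) (f : α → List (List β)) :
    (l.flatMap f).flatten = (l.map (fun x => (f x).flatten)).flatten := by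
  induction l with
  | nil => simp
  | cons x rest ih =>
    simp [List.flatMap_cons, List.flatten_append, ih]

lemma chunk_toList (servers : List (String × List (String × String))) (g : String) :
    ((chunkOf servers g).map String.toList).flatten
      = blockOf servers (membersOf servers) g := by
  rw [chunkOf, blockOf]
  simp [String.toList_append, List.map_map, Function.comp_def,
    show ("[" : String).toList = ['['] from rfl,
    show ("]\n" : String).toList = [']', '\n'] from rfl,
    show ("\n" : String).toList = ['\n'] from rfl]

-- ===== VERDICT (by name: the statement is the Claim_ definition above) =====
theorem ansible_inventory_spec : Claim_equal_ansible_inventory := by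
  intro servers _ _
  unfold Spec_ansible_inventory
  have hA : ansible_inventory servers
      = (build_groups servers).keys.foldl (fun result group =>
          (((build_groups servers).getD group []).foldl (fun result server =>
            result ++ server ++ " ansible_host=" ++
              PySem.Dict.getD (PySem.Dict.mk ((PySem.Dict.mk servers).getD server []))
                "public_ip" "" ++ "\n") (result ++ "[" ++ group ++ "]" ++ "\n")) ++ "\n") "" :=
    rfl
  have hB : ansible_inventory_alt servers
      = PySem.Str.join "" ((ordOf servers).foldl (fun out g =>
          (servers.foldl (fun out p =>
            if g ∈ group_names p.1 then
              out ++ [p.1 ++ " ansible_host=" ++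
                PySem.Dict.getD (PySem.Dict.mk ((PySem.Dict.mk servers).getD p.1 []))
                  "public_ip" "" ++ "\n"]
            else out) (out ++ ["[" ++ g ++ "]\n"])) ++ ["\n"]) []) := rfl
  have hAtl : (ansible_inventory servers).toList
      = ((dictOf servers).keys.map (blockOf servers (membersOf servers))).flatten := by
    rw [hA, renderA_fold_toList, build_groups_eq]
    rw [show ("" : String).toList = [] from rfl, List.nil_append]
    congr 1
    apply List.map_congr_left
    intro g _
    simp [blockOf, getD_dictOf]
  have hBtl : (ansible_inventory_alt servers).toList
      = ((dictOf servers).keys.map (blockOf servers (membersOf servers))).flatten := by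
    rw [hB, outB_eq servers (ordOf servers) [], List.nil_append]
    rw [PySem.Str.toList_join]
    rw [show ("" : String).toList = [] from rfl, join_nil_flatten]
    rw [List.map_flatMap, flatten_flatMap]
    rw [ordOf_eq]
    congr 1
    apply List.map_congr_left
    intro g _
    exact chunk_toList servers g
  calc ansible_inventory servers
      = String.ofList (ansible_inventory servers).toList := String.ofList_toList.symm
    _ = String.ofList (ansible_inventory_alt servers).toList := by rw [hAtl, hBtl]
    _ = ansible_inventory_alt servers := String.ofList_toList
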